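-- pv_equiv track=rewrite | github.com/jennyzzt/LLM_debate_on_ARC | ARC_gen_agents2_rounds3_openai/3aa6fb7a/agent1/algo1.py | solve
-- ===== SOURCE A (Python) =====
-- def solve(input_grid):
--     # Create a copy of the input grid to modify
--     output_grid = [row[:] for row in input_grid]
--
--     # Define the directions to check (up, down, left, right)
--     directions = [(0, -1), (0, 1), (-1, 0), (1, 0)]
--
--     # Get the dimensions of the grid
--     rows, cols = len(input_grid), len(input_grid[0])
--
--     # Iterate through each cell in the grid
--     for r in range(rows):
--         for c in range(cols):
--             # If the cell contains an 8, check its neighbors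
--             if input_grid[r][c] == 8:
--                 for dr, dc in directions:
--                     # Calculate the neighbor's position
--                     nr, nc = r + dr, c + dc
--                     # Check if the neighbor is within the grid bounds
--                     if 0 <= nr < rows and 0 <= nc < cols:
--                         # If the neighbor is a 0, change it to a 1 in the output grid
--                         if input_grid[nr][nc] == 0:
--                             output_grid[nr][nc] = 1
--     return output_grid
-- ===== SOURCE B (Python) =====
-- def solve(input_grid):
--     rows, cols = len(input_grid), len(input_grid[0])
--     output_grid = []
--     for r, row in enumerate(input_grid):
--         new_row = row[:]
--         for c in range(cols):
--             if row[c] == 0 and (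
--                 (r > 0 and input_grid[r - 1][c] == 8)
--                 or (r + 1 < rows and input_grid[r + 1][c] == 8)
--                 or (c > 0 and row[c - 1] == 8)
--                 or (c + 1 < cols and row[c + 1] == 8)
--             ):
--                 new_row[c] = 1
--         output_grid.append(new_row)
--     return output_grid
-- ===== Notes on version B (the rewrite author's own statement) =====
-- stated objective: alternative
-- what changed: Inverts A's scatter form (iterate 8-cells and write 1 into zero neighbors of a mutable copy) into a gather form that builds each output row directly, marking a cell 1 when it is 0 and any orthogonal neighbor is 8.
import Mathlib
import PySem

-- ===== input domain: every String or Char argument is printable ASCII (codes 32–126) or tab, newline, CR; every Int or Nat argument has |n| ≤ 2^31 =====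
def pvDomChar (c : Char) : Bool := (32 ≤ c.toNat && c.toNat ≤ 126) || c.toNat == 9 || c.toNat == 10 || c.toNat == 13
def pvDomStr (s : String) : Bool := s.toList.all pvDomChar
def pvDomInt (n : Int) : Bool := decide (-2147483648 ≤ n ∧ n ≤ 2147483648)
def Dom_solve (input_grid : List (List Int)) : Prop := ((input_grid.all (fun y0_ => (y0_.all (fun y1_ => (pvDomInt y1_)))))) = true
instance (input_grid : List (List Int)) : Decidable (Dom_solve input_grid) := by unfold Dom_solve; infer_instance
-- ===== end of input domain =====

-- B replaces A's scatter loop (iterate 8-cells, write into zero neighbors of a copy)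
-- by a gather loop that builds each output row directly; alternative decomposition, same cost.


-- ===== PORT A =====
def getCell (g : List (List Int)) (r c : Nat) : Int := (g.getD r []).getD c 0

def setCell (g : List (List Int)) (r c : Nat) (v : Int) : List (List Int) :=
  g.set r ((g.getD r []).set c v)

def dirsA : List (Int × Int) := [(0, -1), (0, 1), (-1, 0), (1, 0)]

-- literal port of A: copy, then for each (r,c) with an 8, write 1 into in-bounds zero neighbors
def solve (input_grid : List (List Int)) : List (List Int) :=
  let output0 := input_grid.map (fun row => row)
  let rows := input_grid.length
  let cols := (input_grid.getD 0 []).length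
  (List.range rows).foldl (fun g r =>
    (List.range cols).foldl (fun g c =>
      if getCell input_grid r c == 8 then
        dirsA.foldl (fun g d =>
          let nr : Int := (r : Int) + d.1
          let nc : Int := (c : Int) + d.2
          if 0 ≤ nr ∧ nr < (rows : Int) ∧ 0 ≤ nc ∧ nc < (cols : Int) then
            if getCell input_grid nr.toNat nc.toNat == 0 then
              setCell g nr.toNat nc.toNat 1
            else g
          else g) g
      else g) g) output0

-- ===== PORT B =====
def hasNbr8 (g : List (List Int)) (rows cols r c : Nat) : Bool :=
  (decide (0 < r) && (getCell g (r - 1) c == 8)) ||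
  (decide (r + 1 < rows) && (getCell g (r + 1) c == 8)) ||
  (decide (0 < c) && (getCell g r (c - 1) == 8)) ||
  (decide (c + 1 < cols) && (getCell g r (c + 1) == 8))

-- literal port of B: build each row, marking zeros with an 8 neighbor
def solve_alt (input_grid : List (List Int)) : List (List Int) :=
  let rows := input_grid.length
  let cols := (input_grid.getD 0 []).length
  (PySem.List.enumerate input_grid).map (fun p =>
    (List.range cols).foldl (fun newRow c =>
      if getCell input_grid p.1.toNat c == 0 && hasNbr8 input_grid rows cols p.1.toNat c then
        newRow.set c 1
      else newRow) p.2)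

-- ===== PRECONDITION & SPEC =====
-- Pre_ excludes exactly the inputs on which the Python A raises IndexError:
-- the empty grid (input_grid[0]) and grids with a row shorter than row 0.
def Pre_solve (input_grid : List (List Int)) : Prop :=
  input_grid ≠ [] ∧ ∀ row ∈ input_grid, (input_grid.getD 0 []).length ≤ row.length
instance (input_grid : List (List Int)) : Decidable (Pre_solve input_grid) := by
  unfold Pre_solve; infer_instance

def pvWitness_solve : List (List Int) := [[0, 8, 0], [0, 0, 8]]

def Spec_solve (input_grid : List (List Int)) (out : List (List Int)) : Prop := out = solve_alt input_grid
instance (input_grid : List (List Int)) (out : List (List Int)) : Decidable (Spec_solve input_grid out) := by unfold Spec_solve; infer_instance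

-- ===== CLAIM (what is proved, stated in full; the proofs are below) =====
def Claim_equal_solve : Prop := ∀ (input_grid : List (List Int)), Dom_solve input_grid → Pre_solve input_grid → Spec_solve input_grid (solve input_grid)

-- ===== LEMMAS AND PROOFS =====

def Fstep (grid : List (List Int)) (rows cols : Nat) (g : List (List Int)) (t : Nat × Nat × Int × Int) : List (List Int) :=
  if getCell grid t.1 t.2.1 == 8 then
    let nr : Int := (t.1 : Int) + t.2.2.1
    let nc : Int := (t.2.1 : Int) + t.2.2.2
    if 0 ≤ nr ∧ nr < (rows : Int) ∧ 0 ≤ nc ∧ nc < (cols : Int) then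
      if getCell grid nr.toNat nc.toNat == 0 then setCell g nr.toNat nc.toNat 1 else g
    else g
  else g

def trips (rows cols : Nat) : List (Nat × Nat × Int × Int) :=
  (List.range rows).flatMap (fun r => (List.range cols).flatMap (fun c => dirsA.map (fun d => (r, c, d))))

def marks (grid : List (List Int)) (rows cols : Nat) (t : Nat × Nat × Int × Int) (i j : Nat) : Bool :=
  (getCell grid t.1 t.2.1 == 8) &&
  (decide (0 ≤ (t.1 : Int) + t.2.2.1 ∧ (t.1 : Int) + t.2.2.1 < (rows : Int) ∧ 0 ≤ (t.2.1 : Int) + t.2.2.2 ∧ (t.2.1 : Int) + t.2.2.2 < (cols : Int))) &&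
  (getCell grid ((t.1 : Int) + t.2.2.1).toNat ((t.2.1 : Int) + t.2.2.2).toNat == 0) &&
  (((t.1 : Int) + t.2.2.1) == (i : Int)) && (((t.2.1 : Int) + t.2.2.2) == (j : Int))

lemma length_setCell (g : List (List Int)) (r c : Nat) (v : Int) :
    (setCell g r c v).length = g.length := by
  simp [setCell]

lemma getD_set' {α : Type} (l : List α) (n : Nat) (v : α) (k : Nat) (d : α) :
    (l.set n v).getD k d = if n = k ∧ k < l.length then v else l.getD k d := by
  simp only [List.getD_eq_getElem?_getD, List.getElem?_set]
  split_ifs with h1 h2 h3 <;> simp_all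

lemma getCell_setCell (g : List (List Int)) (r c : Nat) (v : Int) (i j : Nat)
    (hr : r < g.length) (hc : c < (g.getD r []).length) :
    getCell (setCell g r c v) i j = if r = i ∧ c = j then v else getCell g i j := by
  simp only [getCell, setCell, getD_set']
  by_cases h : r = i
  · subst h
    simp [hr]
    simp only [List.getD_eq_getElem?_getD] at hc ⊢
    simp [List.getElem?_set]
    split_ifs <;> simp_all
  · simp [h]

lemma rowlen_setCell (g : List (List Int)) (r c : Nat) (v : Int) (k : Nat) :
    ((setCell g r c v).getD k []).length = (g.getD k []).length := by
  simp only [setCell, getD_set']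
  split_ifs with h <;> simp_all

lemma length_Fstep (grid : List (List Int)) (rows cols : Nat) (g : List (List Int)) (t : Nat × Nat × Int × Int) :
    (Fstep grid rows cols g t).length = g.length := by
  obtain ⟨a, b, d1, d2⟩ := t
  dsimp only [Fstep]
  split_ifs <;> simp [length_setCell]

lemma rowlen_Fstep (grid : List (List Int)) (rows cols : Nat) (g : List (List Int)) (t : Nat × Nat × Int × Int) (k : Nat) :
    ((Fstep grid rows cols g t).getD k []).length = ((g.getD k []).length) := by
  obtain ⟨a, b, d1, d2⟩ := t
  dsimp only [Fstep]
  split_ifs with h1 h2 h3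
  · exact rowlen_setCell g _ _ 1 k
  all_goals rfl

lemma getCell_Fstep (grid : List (List Int)) (rows cols : Nat) (g : List (List Int))
    (t : Nat × Nat × Int × Int) (i j : Nat)
    (hrows : rows = grid.length)
    (hcols : ∀ k, k < grid.length → cols ≤ (grid.getD k []).length)
    (hg : g.length = grid.length)
    (hgr : ∀ k, (g.getD k []).length = (grid.getD k []).length) :
    getCell (Fstep grid rows cols g t) i j = if marks grid rows cols t i j then 1 else getCell g i j := by
  obtain ⟨a, b, d1, d2⟩ := t
  dsimp only [Fstep, marks]
  by_cases h1 : (getCell grid a b == 8) = true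
  · rw [if_pos h1]
    by_cases h2 : 0 ≤ (a : Int) + d1 ∧ (a : Int) + d1 < (rows : Int) ∧ 0 ≤ (b : Int) + d2 ∧ (b : Int) + d2 < (cols : Int)
    · rw [if_pos h2]
      by_cases h3 : (getCell grid ((a : Int) + d1).toNat ((b : Int) + d2).toNat == 0) = true
      · rw [if_pos h3]
        have hb : ((a : Int) + d1).toNat < grid.length := by omega
        rw [getCell_setCell]
        · have hiff : (((a : Int) + d1).toNat = i ∧ ((b : Int) + d2).toNat = j) ↔
              ((a : Int) + d1 = (i : Int) ∧ (b : Int) + d2 = (j : Int)) := by omega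
          simp only [h1, h2, h3, decide_eq_true_eq, Bool.true_and, Bool.and_eq_true, beq_iff_eq]
          split_ifs with hA hB hB <;> simp_all
        · omega
        · rw [hgr]; have := hcols ((a : Int) + d1).toNat hb; omega
      · rw [if_neg h3]
        simp_all
    · rw [if_neg h2]
      simp_all
  · rw [if_neg h1]
    simp_all

lemma foldl_Fstep_char (grid : List (List Int)) (rows cols : Nat)
    (hrows : rows = grid.length)
    (hcols : ∀ k, k < grid.length → cols ≤ (grid.getD k []).length) :
    ∀ (L : List (Nat × Nat × Int × Int)) (g : List (List Int)),
      g.length = grid.length →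
      (∀ k, (g.getD k []).length = (grid.getD k []).length) →
      (L.foldl (Fstep grid rows cols) g).length = grid.length ∧
      (∀ k, ((L.foldl (Fstep grid rows cols) g).getD k []).length = (grid.getD k []).length) ∧
      (∀ i j, getCell (L.foldl (Fstep grid rows cols) g) i j =
        if L.any (fun t => marks grid rows cols t i j) then 1 else getCell g i j) := by
  intro L
  induction L with
  | nil => intro g hg hgr; exact ⟨hg, hgr, by simp⟩
  | cons t L ih =>
    intro g hg hgr
    have hg' : (Fstep grid rows cols g t).length = grid.length := by
      rw [length_Fstep, hg]
    have hgr' : ∀ k, ((Fstep grid rows cols g t).getD k []).length = (grid.getD k []).length := by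
      intro k; rw [rowlen_Fstep, hgr]
    obtain ⟨l1, l2, l3⟩ := ih (Fstep grid rows cols g t) hg' hgr'
    refine ⟨l1, l2, ?_⟩
    intro i j
    rw [List.foldl_cons, l3 i j, getCell_Fstep grid rows cols g t i j hrows hcols hg hgr]
    simp only [List.any_cons]
    by_cases hm : marks grid rows cols t i j <;>
      by_cases ha : L.any (fun t => marks grid rows cols t i j) <;> simp [hm, ha]

lemma solve_eq_foldl (grid : List (List Int)) :
    solve grid = (trips grid.length (grid.getD 0 []).length).foldl
      (Fstep grid grid.length (grid.getD 0 []).length) (grid.map (fun row => row)) := by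
  unfold solve trips
  dsimp only
  rw [List.foldl_flatMap]
  congr 1
  funext g r
  rw [List.foldl_flatMap]
  congr 1
  funext g c
  rw [List.foldl_map]
  by_cases h : (getCell grid r c == 8) = true
  · rw [if_pos h]
    congr 1
    funext g d
    dsimp only [Fstep]
    rw [if_pos h]
  · rw [if_neg h]
    simp [dirsA, Fstep, h]

lemma any_marks_iff (grid : List (List Int)) (rows cols : Nat)
    (hrows : rows = grid.length) (i j : Nat) :
    (trips rows cols).any (fun t => marks grid rows cols t i j) =
      (decide (i < rows) && decide (j < cols) && (getCell grid i j == 0) && hasNbr8 grid rows cols i j) := by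
  rw [Bool.eq_iff_iff]
  simp only [List.any_eq_true, trips, List.mem_flatMap, List.mem_range, List.mem_map, dirsA,
    List.mem_cons, List.not_mem_nil, or_false, marks, hasNbr8, Bool.and_eq_true, Bool.or_eq_true,
    decide_eq_true_eq, beq_iff_eq]
  constructor
  · rintro ⟨x, ⟨r, hr, c, hc, d, hd, rfl⟩, ⟨⟨⟨h8, hbnd⟩, h0⟩, hei⟩, hej⟩
    rcases hd with rfl | rfl | rfl | rfl <;>
      simp only at h8 hbnd h0 hei hej
    · -- d = (0,-1): r = i, c = j+1
      have er : ((r : Int) + 0).toNat = i := by omega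
      have ec : ((c : Int) + (-1)).toNat = j := by omega
      rw [er, ec] at h0
      have hri : r = i := by omega
      have hcj : c = j + 1 := by omega
      subst hri; subst hcj
      exact ⟨⟨⟨by omega, by omega⟩, h0⟩, Or.inr ⟨by omega, h8⟩⟩
    · -- d = (0,1): r = i, c = j-1
      have er : ((r : Int) + 0).toNat = i := by omega
      have ec : ((c : Int) + 1).toNat = j := by omega
      rw [er, ec] at h0
      have hri : r = i := by omega
      have hcj : c = j - 1 := by omega
      subst hri; subst hcj
      exact ⟨⟨⟨by omega, by omega⟩, h0⟩, Or.inl (Or.inr ⟨by omega, h8⟩)⟩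
    · -- d = (-1,0): r = i+1, c = j
      have er : ((r : Int) + (-1)).toNat = i := by omega
      have ec : ((c : Int) + 0).toNat = j := by omega
      rw [er, ec] at h0
      have hcj : c = j := by omega
      have hri : r = i + 1 := by omega
      subst hcj; subst hri
      exact ⟨⟨⟨by omega, by omega⟩, h0⟩, Or.inl (Or.inl (Or.inr ⟨by omega, h8⟩))⟩
    · -- d = (1,0): r = i-1, c = j
      have er : ((r : Int) + 1).toNat = i := by omega
      have ec : ((c : Int) + 0).toNat = j := by omega
      rw [er, ec] at h0
      have hcj : c = j := by omega
      have hri : r = i - 1 := by omega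
      subst hcj; subst hri
      exact ⟨⟨⟨by omega, by omega⟩, h0⟩, Or.inl (Or.inl (Or.inl ⟨by omega, h8⟩))⟩
  · rintro ⟨⟨⟨hi, hj⟩, h0⟩, ((⟨hpos, h8⟩ | ⟨hlt, h8⟩) | ⟨hpos, h8⟩) | ⟨hlt, h8⟩⟩
    · -- above 8: r = i-1, c = j, d = (1,0)
      refine ⟨(i - 1, j, (1, 0)), ⟨i - 1, by omega, j, hj, (1, 0), by simp, rfl⟩, ?_⟩
      simp only
      have er : (((i - 1 : Nat) : Int) + 1).toNat = i := by omega
      have ec : ((j : Int) + 0).toNat = j := by omega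
      rw [er, ec]
      exact ⟨⟨⟨⟨h8, by omega, by omega, by omega, by omega⟩, h0⟩, by omega⟩, by omega⟩
    · -- below 8: r = i+1, c = j, d = (-1,0)
      refine ⟨(i + 1, j, (-1, 0)), ⟨i + 1, by omega, j, hj, (-1, 0), by simp, rfl⟩, ?_⟩
      simp only
      have er : (((i + 1 : Nat) : Int) + (-1)).toNat = i := by omega
      have ec : ((j : Int) + 0).toNat = j := by omega
      rw [er, ec]
      exact ⟨⟨⟨⟨h8, by omega, by omega, by omega, by omega⟩, h0⟩, by omega⟩, by omega⟩
    · -- left 8: r = i, c = j-1, d = (0,1)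
      refine ⟨(i, j - 1, (0, 1)), ⟨i, hi, j - 1, by omega, (0, 1), by simp, rfl⟩, ?_⟩
      simp only
      have er : ((i : Int) + 0).toNat = i := by omega
      have ec : (((j - 1 : Nat) : Int) + 1).toNat = j := by omega
      rw [er, ec]
      exact ⟨⟨⟨⟨h8, by omega, by omega, by omega, by omega⟩, h0⟩, by omega⟩, by omega⟩
    · -- right 8: r = i, c = j+1, d = (0,-1)
      refine ⟨(i, j + 1, (0, -1)), ⟨i, hi, j + 1, hlt, (0, -1), by simp, rfl⟩, ?_⟩
      simp only
      have er : ((i : Int) + 0).toNat = i := by omega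
      have ec : (((j + 1 : Nat) : Int) + (-1)).toNat = j := by omega
      rw [er, ec]
      exact ⟨⟨⟨⟨h8, by omega, by omega, by omega, by omega⟩, h0⟩, by omega⟩, by omega⟩

lemma foldl_set_char (P : Nat → Bool) :
    ∀ (n : Nat) (row : List Int),
      ((List.range n).foldl (fun nr c => if P c then nr.set c 1 else nr) row).length = row.length ∧
      (∀ j, j < row.length →
        ((List.range n).foldl (fun nr c => if P c then nr.set c 1 else nr) row).getD j 0 =
          if j < n ∧ P j then 1 else row.getD j 0) := by
  intro n
  induction n with
  | zero => intro row; simp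
  | succ n ih =>
    intro row
    obtain ⟨ihl, ihg⟩ := ih row
    rw [List.range_succ, List.foldl_append, List.foldl_cons, List.foldl_nil]
    constructor
    · split_ifs <;> simp [ihl]
    · intro j hj
      by_cases hp : P n
      · rw [if_pos hp, getD_set', ihl, ihg j hj]
        by_cases hnj : n = j
        · subst hnj; simp [hj, hp]
        · simp only [hnj, false_and, if_false]
          have he : (j < n + 1 ∧ P j = true) ↔ (j < n ∧ P j = true) := by
            constructor <;> rintro ⟨h1, h2⟩ <;> exact ⟨by omega, h2⟩
          rw [if_congr he rfl rfl]
      · rw [if_neg hp, ihg j hj]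
        have he : (j < n + 1 ∧ P j = true) ↔ (j < n ∧ P j = true) := by
          constructor <;> rintro ⟨h1, h2⟩
          · exact ⟨by rcases Nat.lt_succ_iff_lt_or_eq.mp h1 with h | h; exact h; (subst h; exact absurd h2 (by simp [hp])), h2⟩
          · exact ⟨by omega, h2⟩
        rw [if_congr he rfl rfl]

lemma length_solve_alt (grid : List (List Int)) : (solve_alt grid).length = grid.length := by
  simp [solve_alt]

lemma solve_alt_getD (grid : List (List Int)) (i : Nat) (hi : i < grid.length) :
    (solve_alt grid).getD i [] =
      (List.range (grid.getD 0 []).length).foldl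
        (fun nr c => if getCell grid i c == 0 && hasNbr8 grid grid.length (grid.getD 0 []).length i c then nr.set c 1 else nr)
        (grid.getD i []) := by
  dsimp only [solve_alt]
  rw [List.getD_eq_getElem _ _ (by simpa using hi), List.getElem_map,
    PySem.List.getElem_enumerate, List.getD_eq_getElem _ _ hi]
  simp

theorem main_equiv (grid : List (List Int)) (_hne : grid ≠ [])
    (hrows : ∀ row ∈ grid, (grid.getD 0 []).length ≤ row.length) :
    solve grid = solve_alt grid := by
  have hcols : ∀ k, k < grid.length → (grid.getD 0 []).length ≤ (grid.getD k []).length := by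
    intro k hk
    rw [List.getD_eq_getElem _ _ hk]
    exact hrows _ (List.getElem_mem hk)
  have hmapid : grid.map (fun row => row) = grid := by simp
  obtain ⟨hl, hrl, hc⟩ := foldl_Fstep_char grid grid.length (grid.getD 0 []).length rfl hcols
    (trips grid.length (grid.getD 0 []).length) (grid.map (fun row => row))
    (by rw [hmapid]) (by rw [hmapid]; intro k; rfl)
  rw [solve_eq_foldl]
  apply List.ext_getElem (by rw [hl, length_solve_alt])
  intro i h1 h2
  have hi : i < grid.length := by rw [hl] at h1; exact h1
  obtain ⟨rl, rg⟩ := foldl_set_char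
    (fun c => getCell grid i c == 0 && hasNbr8 grid grid.length (grid.getD 0 []).length i c)
    (grid.getD 0 []).length (grid.getD i [])
  have eA := (List.getD_eq_getElem _ [] h1).symm
  have eB := (List.getD_eq_getElem _ [] h2).symm
  rw [eA, eB]
  have lenA : (((trips grid.length (grid.getD 0 []).length).foldl
      (Fstep grid grid.length (grid.getD 0 []).length) (grid.map fun row => row)).getD i []).length
      = (grid.getD i []).length := hrl i
  have lenB : ((solve_alt grid).getD i []).length = (grid.getD i []).length := by
    rw [solve_alt_getD grid i hi, rl]
  apply List.ext_getElem?
  intro k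
  by_cases hk : k < (grid.getD i []).length
  · have hkA : k < (((trips grid.length (grid.getD 0 []).length).foldl
        (Fstep grid grid.length (grid.getD 0 []).length) (grid.map fun row => row)).getD i []).length := by omega
    have hkB : k < ((solve_alt grid).getD i []).length := by omega
    rw [List.getElem?_eq_getElem hkA, List.getElem?_eq_getElem hkB]
    rw [← List.getD_eq_getElem _ 0 hkA, ← List.getD_eq_getElem _ 0 hkB]
    have lhs : (((trips grid.length (grid.getD 0 []).length).foldl
        (Fstep grid grid.length (grid.getD 0 []).length) (grid.map fun row => row)).getD i []).getD k 0 =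
        getCell ((trips grid.length (grid.getD 0 []).length).foldl
          (Fstep grid grid.length (grid.getD 0 []).length) (grid.map fun row => row)) i k := rfl
    rw [lhs, hc i k, hmapid, any_marks_iff grid grid.length (grid.getD 0 []).length rfl i k,
      solve_alt_getD grid i hi, rg k hk]
    have hgc : (grid.getD i []).getD k 0 = getCell grid i k := rfl
    rw [hgc]
    congr 1
    simp only [Bool.and_eq_true, decide_eq_true_eq, beq_iff_eq]
    exact if_congr (by tauto) rfl rfl
  · rw [List.getElem?_eq_none (by omega), List.getElem?_eq_none (by omega)]

-- ===== VERDICT (by name: the statement is the Claim_ definition above) =====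
theorem solve_spec : Claim_equal_solve := by
  unfold Claim_equal_solve Spec_solve
  intro grid _ hpre
  exact main_equiv grid hpre.1 hpre.2
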